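-- pv_equiv track=rewrite | github.com/umesh-thatikonda/interview-prep-ds-ae | mission-anthropic-de/python-de/bank/07_session_detection.py | max_concurrent_sessions
-- ===== SOURCE A (Python) =====
-- def max_concurrent_sessions(sessions):
--     events = []
--     for s in sessions:
--         events.append((s["start_ts"], 1))   # +1 at start
--         events.append((s["end_ts"],   -1))  # -1 at end
--     # Sort: by time, ties broken by -1 before +1 (ends before starts at same ts)
--     events.sort(key=lambda x: (x[0], x[1]))
--
--     peak = 0
--     current = 0
--     peak_ts = None
--     for ts, delta in events:
--         current += delta
--         if current > peak:
--             peak = current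
--             peak_ts = ts
--     return {"peak_concurrent": peak, "peak_at_timestamp": peak_ts}
-- ===== SOURCE B (Python) =====
-- def max_concurrent_sessions(sessions):
--     starts = sorted(s["start_ts"] for s in sessions)
--     ends = sorted(s["end_ts"] for s in sessions)
--     i = j = 0
--     current = peak = 0
--     peak_ts = None
--     while i < len(starts) or j < len(ends):
--         if i < len(starts) and (j >= len(ends) or starts[i] < ends[j]):
--             current += 1
--             if current > peak:
--                 peak = current
--                 peak_ts = starts[i]
--             i += 1
--         else:
--             current -= 1
--             j += 1
--     return {"peak_concurrent": peak, "peak_at_timestamp": peak_ts}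
-- ===== Notes on version B (the rewrite author's own statement) =====
-- stated objective: alternative
-- what changed: Instead of building one combined (ts,delta) event list and sorting it by a tuple key, B sorts the start and end timestamps into two separate lists and sweeps them with a two-pointer merge (ends win ties), updating peak only on starts.
import Mathlib
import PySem

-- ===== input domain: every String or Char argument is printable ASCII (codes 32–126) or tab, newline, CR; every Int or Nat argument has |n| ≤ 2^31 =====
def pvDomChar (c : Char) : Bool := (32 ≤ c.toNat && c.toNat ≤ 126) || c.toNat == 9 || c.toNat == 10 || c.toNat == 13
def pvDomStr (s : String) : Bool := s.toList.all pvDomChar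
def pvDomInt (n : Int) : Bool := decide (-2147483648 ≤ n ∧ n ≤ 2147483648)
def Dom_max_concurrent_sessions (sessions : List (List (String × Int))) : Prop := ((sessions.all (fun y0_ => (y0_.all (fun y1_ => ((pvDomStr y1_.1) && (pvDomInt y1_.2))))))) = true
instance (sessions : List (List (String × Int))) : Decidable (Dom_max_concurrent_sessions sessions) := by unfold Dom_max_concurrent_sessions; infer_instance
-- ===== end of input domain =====

-- B replaces A's build-one-event-list-and-sort-by-(ts,delta)-key sweep by a two-pointer merge of the
-- separately sorted start and end timestamp lists (alternative decomposition, same asymptotic cost).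

-- shared trivial helper: s["k"] as first-match association-list lookup (the default 0 is never
-- reached inside Pre_, where the key is present; outside Pre_ Python raises KeyError)
def pvLookup (s : List (String × Int)) (k : String) : Int :=
  ((s.find? (fun p => p.1 == k)).map (fun p => p.2)).getD 0

-- ===== PORT A =====
def max_concurrent_sessions (sessions : List (List (String × Int))) : List (String × Option Int) :=
  let events := sessions.foldl
    (fun ev s => (ev ++ [(pvLookup s "start_ts", (1 : Int))]) ++ [(pvLookup s "end_ts", (-1 : Int))]) []
  let events := PySem.List.sorted2 events (fun x => x.1) (fun x => x.2)
  let r := events.foldl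
    (fun (st : Int × Int × Option Int) e =>
      let current := st.2.1 + e.2
      if st.1 < current then (current, current, some e.1) else (st.1, current, st.2.2))
    (0, 0, none)
  [("peak_concurrent", some r.1), ("peak_at_timestamp", r.2.2)]

-- ===== PORT B =====
-- the two-pointer while-loop of Source B (the argument lists are the i/j suffixes still to process)
def pvSweep (starts ends_ : List Int) (current peak : Int) (peak_ts : Option Int) : Int × Option Int :=
  match starts, ends_ with
  | [], [] => (peak, peak_ts)
  | [], _ :: es => pvSweep [] es (current - 1) peak peak_ts
  | s :: ss, [] =>
      if peak < current + 1 then pvSweep ss [] (current + 1) (current + 1) (some s)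
      else pvSweep ss [] (current + 1) peak peak_ts
  | s :: ss, e :: es =>
      if s < e then
        (if peak < current + 1 then pvSweep ss (e :: es) (current + 1) (current + 1) (some s)
         else pvSweep ss (e :: es) (current + 1) peak peak_ts)
      else pvSweep (s :: ss) es (current - 1) peak peak_ts
termination_by starts.length + ends_.length

def max_concurrent_sessions_alt (sessions : List (List (String × Int))) : List (String × Option Int) :=
  let starts := PySem.List.sorted (sessions.map (fun s => pvLookup s "start_ts")) (fun x => x)
  let ends_ := PySem.List.sorted (sessions.map (fun s => pvLookup s "end_ts")) (fun x => x)
  let r := pvSweep starts ends_ 0 0 none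
  [("peak_concurrent", some r.1), ("peak_at_timestamp", r.2)]

-- ===== PRECONDITION & SPEC =====
-- Pre_ excludes exactly the inputs containing a session without a "start_ts" or "end_ts" key,
-- on which the Python A raises KeyError.
def Pre_max_concurrent_sessions (sessions : List (List (String × Int))) : Prop :=
  ∀ s ∈ sessions, (s.any (fun p => p.1 == "start_ts")) = true ∧ (s.any (fun p => p.1 == "end_ts")) = true
instance (sessions : List (List (String × Int))) : Decidable (Pre_max_concurrent_sessions sessions) := by
  unfold Pre_max_concurrent_sessions; infer_instance

def pvWitness_max_concurrent_sessions : (List (List (String × Int))) :=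
  [[("start_ts", 1), ("end_ts", 3)], [("start_ts", 2), ("end_ts", 5)]]

def Spec_max_concurrent_sessions (sessions : List (List (String × Int))) (out : List (String × Option Int)) : Prop := out = max_concurrent_sessions_alt sessions
instance (sessions : List (List (String × Int))) (out : List (String × Option Int)) : Decidable (Spec_max_concurrent_sessions sessions out) := by unfold Spec_max_concurrent_sessions; infer_instance

-- ===== CLAIM (what is proved, stated in full; the proofs are below) =====
def Claim_equal_max_concurrent_sessions : Prop := ∀ (sessions : List (List (String × Int))), Dom_max_concurrent_sessions sessions → Pre_max_concurrent_sessions sessions → Spec_max_concurrent_sessions sessions (max_concurrent_sessions sessions)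

-- ===== LEMMAS AND PROOFS =====

-- the event sequence B's merge walks through, as a list (ends win ties, like A's (ts, delta) key)
def mergeL : List Int → List Int → List (Int × Int)
  | [], [] => []
  | [], e :: es => (e, -1) :: mergeL [] es
  | s :: ss, [] => (s, 1) :: mergeL ss []
  | s :: ss, e :: es =>
      if s < e then (s, 1) :: mergeL ss (e :: es) else (e, -1) :: mergeL (s :: ss) es
termination_by a b => a.length + b.length

lemma mergeL_perm (n : Nat) : ∀ (ss es : List Int), ss.length + es.length = n →
    (mergeL ss es).Perm (ss.map (fun s => (s, (1 : Int))) ++ es.map (fun e => (e, (-1 : Int)))) := by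
  induction n using Nat.strong_induction_on with
  | _ n ih =>
    intro ss es hn
    match ss, es with
    | [], [] => simp [mergeL]
    | [], e :: es =>
      simp only [mergeL, List.map_nil, List.nil_append, List.map_cons]
      exact (ih (es.length) (by simp at hn; omega) [] es (by simp)).cons _
    | s :: ss, [] =>
      simp only [mergeL, List.map_cons, List.map_nil, List.append_nil]
      have := ih (ss.length) (by simp at hn; omega) ss [] (by simp)
      simpa using this.cons (s, (1:Int))
    | s :: ss, e :: es =>
      simp only [mergeL]
      split
      · have := ih (ss.length + (e::es).length) (by simp at hn ⊢; omega) ss (e :: es) rfl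
        simpa using this.cons (s, (1:Int))
      · have := ih ((s::ss).length + es.length) (by simp at hn ⊢; omega) (s :: ss) es rfl
        refine ((this.cons (e, (-1:Int))).trans ?_)
        exact (List.perm_middle).symm

lemma mem_mergeL {ss es : List Int} {x : Int × Int} (hx : x ∈ mergeL ss es) :
    (x.2 = 1 ∧ x.1 ∈ ss) ∨ (x.2 = -1 ∧ x.1 ∈ es) := by
  have := (mergeL_perm (ss.length + es.length) ss es rfl).mem_iff.mp hx
  simp only [List.mem_append, List.mem_map] at this
  rcases this with ⟨t, ht, rfl⟩ | ⟨t, ht, rfl⟩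
  · exact Or.inl ⟨rfl, ht⟩
  · exact Or.inr ⟨rfl, ht⟩

lemma lex_le_of {a b : Int × Int} (h : a.1 < b.1 ∨ (a.1 = b.1 ∧ a.2 ≤ b.2)) :
    (toLex a : Int ×ₗ Int) ≤ toLex b := Prod.Lex.le_iff.mpr h

lemma mergeL_pairwise (n : Nat) : ∀ (ss es : List Int), ss.length + es.length = n →
    ss.Pairwise (· ≤ ·) → es.Pairwise (· ≤ ·) →
    (mergeL ss es).Pairwise (fun a b => (toLex a : Int ×ₗ Int) ≤ toLex b) := by
  induction n using Nat.strong_induction_on with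
  | _ n ih =>
    intro ss es hn hs he
    match ss, es with
    | [], [] => simp [mergeL]
    | [], e :: es =>
      rw [List.pairwise_cons] at he
      simp only [mergeL, List.pairwise_cons]
      refine ⟨?_, ih es.length (by simp at hn; omega) [] es (by simp) (by simp) he.2⟩
      intro y hy
      rcases mem_mergeL hy with ⟨h2, h1⟩ | ⟨h2, h1⟩
      · simp at h1
      · have h := he.1 _ h1
        rcases eq_or_lt_of_le h with h' | h'
        · exact lex_le_of (Or.inr ⟨h', by omega⟩)
        · exact lex_le_of (Or.inl h')
    | s :: ss, [] =>
      rw [List.pairwise_cons] at hs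
      simp only [mergeL, List.pairwise_cons]
      refine ⟨?_, ih ss.length (by simp at hn; omega) ss [] (by simp) hs.2 (by simp)⟩
      intro y hy
      rcases mem_mergeL hy with ⟨h2, h1⟩ | ⟨h2, h1⟩
      · have h := hs.1 _ h1
        rcases eq_or_lt_of_le h with h' | h'
        · exact lex_le_of (Or.inr ⟨h', by omega⟩)
        · exact lex_le_of (Or.inl h')
      · simp at h1
    | s :: ss, e :: es =>
      rw [List.pairwise_cons] at hs he
      simp only [mergeL]
      split
      · rename_i hlt
        rw [List.pairwise_cons]
        refine ⟨?_, ih (ss.length + (e::es).length) (by simp at hn ⊢; omega) ss (e :: es) rfl hs.2 (List.pairwise_cons.mpr he)⟩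
        intro y hy
        rcases mem_mergeL hy with ⟨h2, h1⟩ | ⟨h2, h1⟩
        · have h := hs.1 _ h1
          rcases eq_or_lt_of_le h with h' | h'
          · exact lex_le_of (Or.inr ⟨h', by omega⟩)
          · exact lex_le_of (Or.inl h')
        · rcases List.mem_cons.mp h1 with h1 | h1
          · exact lex_le_of (Or.inl (by omega))
          · have := he.1 _ h1
            exact lex_le_of (Or.inl (by omega))
      · rename_i hge
        rw [List.pairwise_cons]
        refine ⟨?_, ih ((s::ss).length + es.length) (by simp at hn ⊢; omega) (s :: ss) es rfl (List.pairwise_cons.mpr hs) he.2⟩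
        intro y hy
        rcases mem_mergeL hy with ⟨h2, h1⟩ | ⟨h2, h1⟩
        · rcases List.mem_cons.mp h1 with h1 | h1
          · subst h1
            rcases eq_or_lt_of_le (le_of_not_gt hge) with h' | h'
            · exact lex_le_of (Or.inr ⟨h', by omega⟩)
            · exact lex_le_of (Or.inl h')
          · have h := hs.1 _ h1
            have hes := le_of_not_gt hge
            rcases eq_or_lt_of_le (hes.trans h) with h' | h'
            · exact lex_le_of (Or.inr ⟨h', by omega⟩)
            · exact lex_le_of (Or.inl h')
        · have h := he.1 _ h1
          rcases eq_or_lt_of_le h with h' | h'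
          · exact lex_le_of (Or.inr ⟨h', by omega⟩)
          · exact lex_le_of (Or.inl h')

lemma sorted2_eq_sorted_toLex (xs : List (Int × Int)) :
    PySem.List.sorted2 xs (fun x => x.1) (fun x => x.2)
      = PySem.List.sorted xs (fun x => (toLex x : Int ×ₗ Int)) := by
  rw [PySem.List.sorted_eq_foldl_insertBy]
  show List.foldl _ [] xs = _
  congr 1
  funext acc x
  congr 1
  funext a b
  show (decide (a.1 < b.1) || !decide (b.1 < a.1) && decide (a.2 < b.2))
      = decide ((toLex a : Int ×ₗ Int) < toLex b)
  rcases a with ⟨a1, a2⟩; rcases b with ⟨b1, b2⟩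
  by_cases h : a1 < b1 <;> by_cases h' : b1 < a1 <;> by_cases h2 : a2 < b2 <;>
    simp [h, h', h2, Prod.Lex.lt_iff] <;> omega

lemma sweep_eq_fold (n : Nat) : ∀ (ss es : List Int) (cur peak : Int) (pts : Option Int),
    ss.length + es.length = n → cur ≤ peak →
    pvSweep ss es cur peak pts =
      (let r := (mergeL ss es).foldl
        (fun (st : Int × Int × Option Int) e =>
          let current := st.2.1 + e.2
          if st.1 < current then (current, current, some e.1) else (st.1, current, st.2.2))
        (peak, cur, pts)
       (r.1, r.2.2)) := by
  induction n using Nat.strong_induction_on with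
  | _ n ih =>
    intro ss es cur peak pts hn hc
    match ss, es with
    | [], [] => simp [pvSweep, mergeL]
    | [], e :: es =>
      simp only [pvSweep, mergeL, List.foldl_cons]
      rw [ih es.length (by simp at hn; omega) [] es (cur - 1) peak pts (by simp) (by omega)]
      simp only []
      have : ¬ peak < cur + -1 := by omega
      simp [this, sub_eq_add_neg]
    | s :: ss, [] =>
      simp only [pvSweep, mergeL, List.foldl_cons]
      by_cases h : peak < cur + 1
      · rw [if_pos h, ih ss.length (by simp at hn; omega) ss [] (cur + 1) (cur + 1) (some s) (by simp) (by omega)]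
        simp [h]
      · rw [if_neg h, ih ss.length (by simp at hn; omega) ss [] (cur + 1) peak pts (by simp) (by omega)]
        simp [h]
    | s :: ss, e :: es =>
      simp only [pvSweep, mergeL]
      by_cases hse : s < e
      · rw [if_pos hse, if_pos hse]
        simp only [List.foldl_cons]
        by_cases h : peak < cur + 1
        · rw [if_pos h, ih (ss.length + (e::es).length) (by simp at hn ⊢; omega) ss (e :: es) (cur + 1) (cur + 1) (some s) rfl (by omega)]
          simp [h]
        · rw [if_neg h, ih (ss.length + (e::es).length) (by simp at hn ⊢; omega) ss (e :: es) (cur + 1) peak pts rfl (by omega)]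
          simp [h]
      · rw [if_neg hse, if_neg hse]
        simp only [List.foldl_cons]
        rw [ih ((s::ss).length + es.length) (by simp at hn ⊢; omega) (s :: ss) es (cur - 1) peak pts rfl (by omega)]
        have : ¬ peak < cur + -1 := by omega
        simp [this, sub_eq_add_neg]

lemma events_eq_flatMap (sessions : List (List (String × Int))) :
    sessions.foldl
      (fun ev s => (ev ++ [(pvLookup s "start_ts", (1 : Int))]) ++ [(pvLookup s "end_ts", (-1 : Int))]) []
    = sessions.flatMap (fun s => [(pvLookup s "start_ts", (1 : Int)), (pvLookup s "end_ts", (-1 : Int))]) := by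
  refine (PySem.List.foldl_congr_mem sessions _
      (fun ev s => ev ++ [(pvLookup s "start_ts", (1 : Int)), (pvLookup s "end_ts", (-1 : Int))]) []
      (by intro acc x _; simp)).trans ?_
  simpa using PySem.List.foldl_append_eq_flatMap
    (fun s => [(pvLookup s "start_ts", (1 : Int)), (pvLookup s "end_ts", (-1 : Int))]) sessions []

lemma events_perm (sessions : List (List (String × Int))) :
    (sessions.flatMap (fun s => [(pvLookup s "start_ts", (1 : Int)), (pvLookup s "end_ts", (-1 : Int))])).Perm
      ((sessions.map (fun s => pvLookup s "start_ts")).map (fun t => (t, (1 : Int)))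
        ++ (sessions.map (fun s => pvLookup s "end_ts")).map (fun t => (t, (-1 : Int)))) := by
  induction sessions with
  | nil => simp
  | cons a l ih =>
    simp only [List.flatMap_cons, List.map_cons, List.cons_append]
    refine List.Perm.cons _ ?_
    exact ((ih.cons _).trans List.perm_middle.symm)

lemma sorted_events_eq_mergeL (sessions : List (List (String × Int))) :
    PySem.List.sorted
      (sessions.flatMap (fun s => [(pvLookup s "start_ts", (1 : Int)), (pvLookup s "end_ts", (-1 : Int))]))
      (fun x => (toLex x : Int ×ₗ Int))
    = mergeL (PySem.List.sorted (sessions.map (fun s => pvLookup s "start_ts")) (fun x => x))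
             (PySem.List.sorted (sessions.map (fun s => pvLookup s "end_ts")) (fun x => x)) := by
  set sS := PySem.List.sorted (sessions.map (fun s => pvLookup s "start_ts")) (fun x => x) with hsS
  set eS := PySem.List.sorted (sessions.map (fun s => pvLookup s "end_ts")) (fun x => x) with heS
  apply PySem.List.eq_of_perm_of_pairwise_le_of_injective (fun x : Int × Int => (toLex x : Int ×ₗ Int))
    toLex.injective
  · have h1 : ((sessions.map (fun s => pvLookup s "start_ts")).map (fun t => (t, (1 : Int)))).Perm
        (sS.map (fun t => (t, (1 : Int)))) :=
      ((PySem.List.sorted_perm (sessions.map (fun s => pvLookup s "start_ts")) (fun x => x) false).map _).symm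
    have h2 : ((sessions.map (fun s => pvLookup s "end_ts")).map (fun t => (t, (-1 : Int)))).Perm
        (eS.map (fun t => (t, (-1 : Int)))) :=
      ((PySem.List.sorted_perm (sessions.map (fun s => pvLookup s "end_ts")) (fun x => x) false).map _).symm
    exact (PySem.List.sorted_perm _ _ false).trans ((events_perm sessions).trans
      ((h1.append h2).trans (mergeL_perm (sS.length + eS.length) sS eS rfl).symm))
  · exact PySem.List.sorted_pairwise _ _
  · exact mergeL_pairwise (sS.length + eS.length) sS eS rfl
      (by simpa using PySem.List.sorted_pairwise (sessions.map (fun s => pvLookup s "start_ts")) (fun x => x))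
      (by simpa using PySem.List.sorted_pairwise (sessions.map (fun s => pvLookup s "end_ts")) (fun x => x))

theorem main_eq (sessions : List (List (String × Int))) :
    max_concurrent_sessions sessions = max_concurrent_sessions_alt sessions := by
  unfold max_concurrent_sessions max_concurrent_sessions_alt
  simp only [events_eq_flatMap, sorted2_eq_sorted_toLex, sorted_events_eq_mergeL]
  rw [sweep_eq_fold _ _ _ 0 0 none rfl le_rfl]

-- ===== VERDICT (by name: the statement is the Claim_ definition above) =====
theorem max_concurrent_sessions_spec : Claim_equal_max_concurrent_sessions := by
  intro sessions _ _
  unfold Spec_max_concurrent_sessions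
  exact main_eq sessions
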